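-- pv_equiv track=rewrite | github.com/andreugallofre/qontract-reconcile | reconcile/vault_replication.py | list_invalid_paths
-- ===== SOURCE A (Python) =====
-- from collections.abc import Iterable
--
-- def list_invalid_paths(
--     path_list: Iterable[str], policy_paths: Iterable[str]
-- ) -> list[str]:
--     invalid_paths = []
--
--     for path in path_list:
--         if not policy_contains_path(path, policy_paths):
--             invalid_paths.append(path)
--
--     return invalid_paths
--
-- def policy_contains_path(path: str, policy_paths: Iterable[str]) -> bool:
--     return any(path in p_path for p_path in policy_paths)
-- ===== SOURCE B (Python) =====
-- def list_invalid_paths(path_list, policy_paths):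
--     paths = list(path_list)
--     lengths = {len(path) for path in paths}
--     subs = set()
--     for p in policy_paths:
--         for L in lengths:
--             for i in range(len(p) - L + 1):
--                 subs.add(p[i:i + L])
--     return [path for path in paths if path not in subs]
-- ===== Notes on version B (the rewrite author's own statement) =====
-- stated objective: faster
-- what changed: Instead of testing each path against every policy path with Python's substring search, B precomputes one set of all policy-path substrings whose lengths occur among the input paths, then answers each path by a single O(1)-expected set-membership lookup.
import Mathlib
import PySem

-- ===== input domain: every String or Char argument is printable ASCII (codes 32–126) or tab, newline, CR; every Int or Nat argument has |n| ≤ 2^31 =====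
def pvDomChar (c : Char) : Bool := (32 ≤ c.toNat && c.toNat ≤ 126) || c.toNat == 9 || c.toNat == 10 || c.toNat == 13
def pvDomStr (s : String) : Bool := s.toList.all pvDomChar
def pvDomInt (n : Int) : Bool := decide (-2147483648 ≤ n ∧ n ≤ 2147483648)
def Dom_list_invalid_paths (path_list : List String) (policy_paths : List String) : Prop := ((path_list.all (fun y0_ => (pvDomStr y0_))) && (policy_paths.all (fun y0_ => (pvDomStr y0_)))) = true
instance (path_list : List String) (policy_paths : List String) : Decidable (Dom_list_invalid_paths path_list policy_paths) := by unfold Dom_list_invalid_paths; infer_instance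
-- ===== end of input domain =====

-- B replaces A's per-path scan over all policy paths by one precomputed set of the
-- policy substrings whose lengths occur among the paths (objective: faster; measured).

-- ===== PORT A =====
def policy_contains_path (path : String) (policy_paths : List String) : Bool :=
  policy_paths.any (fun p_path => PySem.Str.isIn path p_path)

def list_invalid_paths (path_list : List String) (policy_paths : List String) : List String :=
  path_list.foldl
    (fun invalid_paths path =>
      if !(policy_contains_path path policy_paths) then invalid_paths ++ [path]
      else invalid_paths)
    []

-- ===== PORT B =====
def list_invalid_paths_alt (path_list : List String) (policy_paths : List String) : List String :=
  let lengths : PySem.Set Int := PySem.Set.ofList (path_list.map PySem.Str.len)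
  let subs : PySem.Set String :=
    policy_paths.foldl
      (fun subs p =>
        lengths.foldl
          (fun subs L =>
            (PySem.List.pyRange 0 (PySem.Str.len p - L + 1) 1).foldl
              (fun subs i => PySem.Set.add subs (PySem.Str.slice p (some i) (some (i + L))))
              subs)
          subs)
      PySem.Set.empty
  path_list.filter (fun path => !(PySem.Set.contains subs path))

-- ===== PRECONDITION & SPEC =====
def Spec_list_invalid_paths (path_list : List String) (policy_paths : List String) (out : List String) : Prop := out = list_invalid_paths_alt path_list policy_paths
instance (path_list : List String) (policy_paths : List String) (out : List String) : Decidable (Spec_list_invalid_paths path_list policy_paths out) := by unfold Spec_list_invalid_paths; infer_instance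

-- ===== CLAIM (what is proved, stated in full; the proofs are below) =====
def Claim_equal_list_invalid_paths : Prop := ∀ (path_list : List String) (policy_paths : List String), Dom_list_invalid_paths path_list policy_paths → Spec_list_invalid_paths path_list policy_paths (list_invalid_paths path_list policy_paths)

-- ===== LEMMAS AND PROOFS =====

/-- Membership in a fold that only ever adds elements to a set. -/
theorem pv_mem_foldl {α : Type} (x : String) (g : PySem.Set String → α → PySem.Set String)
    (P : α → Prop) (h : ∀ s a, x ∈ g s a ↔ x ∈ s ∨ P a) :
    ∀ (l : List α) (s : PySem.Set String), x ∈ l.foldl g s ↔ x ∈ s ∨ ∃ a ∈ l, P a := by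
  intro l
  induction l with
  | nil => simp
  | cons a l ih =>
    intro s
    rw [List.foldl_cons, ih, h]
    simp only [List.mem_cons]
    aesop

/-- Characterisation of the substring set B builds. -/
theorem pv_mem_subs (x : String) (lens : PySem.Set Int) (pol : List String) :
    x ∈ pol.foldl
        (fun subs p =>
          lens.foldl
            (fun subs L =>
              (PySem.List.pyRange 0 (PySem.Str.len p - L + 1) 1).foldl
                (fun subs i => PySem.Set.add subs (PySem.Str.slice p (some i) (some (i + L))))
                subs)
            subs)
        PySem.Set.empty
      ↔ ∃ p ∈ pol, ∃ L ∈ lens, ∃ i ∈ PySem.List.pyRange 0 (PySem.Str.len p - L + 1) 1,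
          x = PySem.Str.slice p (some i) (some (i + L)) := by
  rw [pv_mem_foldl x _
      (fun p => ∃ L ∈ lens, ∃ i ∈ PySem.List.pyRange 0 (PySem.Str.len p - L + 1) 1,
          x = PySem.Str.slice p (some i) (some (i + L)))]
  · simp [PySem.Set.empty]
  · intro s p
    rw [pv_mem_foldl x _
        (fun L => ∃ i ∈ PySem.List.pyRange 0 (PySem.Str.len p - L + 1) 1,
            x = PySem.Str.slice p (some i) (some (i + L)))]
    intro s L
    rw [pv_mem_foldl x _
        (fun i => x = PySem.Str.slice p (some i) (some (i + L)))]
    intro s i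
    exact PySem.Set.mem_add s _ x

/-- A slice of p is an infix of p; conversely, any infix of p whose length is in `lens`
    arises as one of the slices B stores. -/
theorem pv_slice_iff_infix (path p : String) (lens : PySem.Set Int)
    (hmem : PySem.Str.len path ∈ lens) (hpos : ∀ L ∈ lens, 0 ≤ L) :
    (∃ L ∈ lens, ∃ i ∈ PySem.List.pyRange 0 (PySem.Str.len p - L + 1) 1,
        path = PySem.Str.slice p (some i) (some (i + L)))
      ↔ path.toList <:+: p.toList := by
  constructor
  · rintro ⟨L, hL, i, hi, hx⟩
    have hL0 : 0 ≤ L := hpos L hL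
    have hi' := PySem.List.mem_pyRange_one.mp hi
    have h0i : 0 ≤ i := hi'.1
    have : path.toList = ((p.toList.drop i.toNat).take ((i + L).toNat - i.toNat)) := by
      rw [hx]
      rw [PySem.Str.toList_slice, PySem.Chars.slice_eq_listSlice,
        PySem.List.slice_toNat p.toList h0i (by omega)]
    rw [this]
    exact (List.take_prefix _ _).isInfix.trans (List.drop_suffix _ _).isInfix
  · rintro ⟨t, u, htu⟩
    refine ⟨PySem.Str.len path, hmem, (t.length : Int), ?_, ?_⟩
    · rw [PySem.List.mem_pyRange_one]
      have hlen : p.toList.length = t.length + path.toList.length + u.length := by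
        rw [← htu]; simp; omega
      rw [PySem.Str.len_eq, PySem.Str.len_eq]
      omega
    · rw [← String.toList_inj, PySem.Str.toList_slice, PySem.Chars.slice_eq_listSlice,
        PySem.List.slice_toNat p.toList (by positivity)
          (by rw [PySem.Str.len_eq]; positivity)]
      have h1 : ((t.length : Int) + PySem.Str.len path).toNat = t.length + path.toList.length := by
        rw [PySem.Str.len_eq]; omega
      have h2 : ((t.length : Int)).toNat = t.length := by omega
      rw [h1, h2, ← htu]
      rw [List.append_assoc, List.drop_left]
      have h3 : t.length + path.toList.length - t.length = path.toList.length := by omega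
      rw [h3, List.take_left]

/-- Pointwise agreement of the two membership tests, for a path of the input list. -/
theorem pv_contains_eq (path : String) (path_list policy_paths : List String)
    (hp : path ∈ path_list) :
    PySem.Set.contains
        (policy_paths.foldl
          (fun subs p =>
            (PySem.Set.ofList (path_list.map PySem.Str.len)).foldl
              (fun subs L =>
                (PySem.List.pyRange 0 (PySem.Str.len p - L + 1) 1).foldl
                  (fun subs i => PySem.Set.add subs (PySem.Str.slice p (some i) (some (i + L))))
                  subs)
              subs)
          PySem.Set.empty)
        path
      = policy_contains_path path policy_paths := by
  have hmem : PySem.Str.len path ∈ PySem.Set.ofList (path_list.map PySem.Str.len) := by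
    rw [PySem.Set.mem_ofList]
    exact List.mem_map_of_mem hp
  have hpos : ∀ L ∈ PySem.Set.ofList (path_list.map PySem.Str.len), 0 ≤ L := by
    intro L hL
    rw [PySem.Set.mem_ofList, List.mem_map] at hL
    obtain ⟨q, _, rfl⟩ := hL
    rw [PySem.Str.len_eq]; positivity
  by_cases h : ∃ p ∈ policy_paths, path.toList <:+: p.toList
  · have hA : policy_contains_path path policy_paths = true := by
      unfold policy_contains_path
      rw [List.any_eq_true]
      obtain ⟨p, hpmem, hinf⟩ := h
      exact ⟨p, hpmem, (PySem.Str.isIn_iff_infix path p).mpr hinf⟩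
    rw [hA, PySem.Set.contains_iff, pv_mem_subs]
    obtain ⟨p, hpmem, hinf⟩ := h
    exact ⟨p, hpmem, (pv_slice_iff_infix path p _ hmem hpos).mpr hinf⟩
  · have hA : policy_contains_path path policy_paths = false := by
      unfold policy_contains_path
      rw [List.any_eq_false]
      intro p hpmem
      rw [Bool.not_eq_true, ← Bool.not_eq_true, PySem.Str.isIn_iff_infix]
      exact fun hinf => h ⟨p, hpmem, hinf⟩
    rw [hA, ← Bool.not_eq_true, PySem.Set.contains_iff, pv_mem_subs]
    rintro ⟨p, hpmem, hrest⟩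
    exact h ⟨p, hpmem, (pv_slice_iff_infix path p _ hmem hpos).mp hrest⟩

-- ===== VERDICT (by name: the statement is the Claim_ definition above) =====
theorem list_invalid_paths_spec : Claim_equal_list_invalid_paths := by
  intro path_list policy_paths _
  unfold Spec_list_invalid_paths list_invalid_paths
  have halt : list_invalid_paths_alt path_list policy_paths =
      path_list.filter (fun path =>
        !(PySem.Set.contains
          (policy_paths.foldl
            (fun subs p =>
              (PySem.Set.ofList (path_list.map PySem.Str.len)).foldl
                (fun subs L =>
                  (PySem.List.pyRange 0 (PySem.Str.len p - L + 1) 1).foldl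
                    (fun subs i =>
                      PySem.Set.add subs (PySem.Str.slice p (some i) (some (i + L))))
                    subs)
                subs)
            PySem.Set.empty)
          path)) := rfl
  rw [halt,
    PySem.List.foldl_append_if (fun path => !(policy_contains_path path policy_paths))
      (fun path => path)]
  simp only [List.map_id', List.nil_append]
  apply List.filter_congr
  intro path hp
  rw [pv_contains_eq path path_list policy_paths hp]
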